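-- pv_equiv track=rewrite | github.com/f13rce/CyberArk-MaliciousLogAnalyzer | StringParser/stringparser.py | GetLogHash
-- ===== SOURCE A (Python) =====
-- def GetLogHash(aLog):
--     ret = ""
--     skippedPre = False
--     for entry in aLog:
--         if not skippedPre:
--             if entry[0] == "event_id":
--                 skippedPre = True
--
--         if skippedPre:
--             ret += entry[0]
--             ret += "|||"
--             ret += entry[1]
--     return ret
-- ===== SOURCE B (Python) =====
-- def GetLogHash(aLog):
--     # Right-to-left pass: build the joined suffix back-to-front; each time an
--     # "event_id" key appears, snapshot the suffix built so far. The leftmost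
--     # "event_id" is seen last, so its snapshot wins — exactly A's result.
--     acc = ""
--     res = ""
--     for e in reversed(aLog):
--         acc = e[0] + "|||" + e[1] + acc
--         if e[0] == "event_id":
--             res = acc
--     return res
-- ===== Notes on version B (the rewrite author's own statement) =====
-- stated objective: alternative
-- what changed: Replaced the forward skip-flag state machine accumulating with += by a single right-to-left pass that builds the joined suffix back-to-front and snapshots it at each event_id key, the leftmost snapshot winning.
import Mathlib
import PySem

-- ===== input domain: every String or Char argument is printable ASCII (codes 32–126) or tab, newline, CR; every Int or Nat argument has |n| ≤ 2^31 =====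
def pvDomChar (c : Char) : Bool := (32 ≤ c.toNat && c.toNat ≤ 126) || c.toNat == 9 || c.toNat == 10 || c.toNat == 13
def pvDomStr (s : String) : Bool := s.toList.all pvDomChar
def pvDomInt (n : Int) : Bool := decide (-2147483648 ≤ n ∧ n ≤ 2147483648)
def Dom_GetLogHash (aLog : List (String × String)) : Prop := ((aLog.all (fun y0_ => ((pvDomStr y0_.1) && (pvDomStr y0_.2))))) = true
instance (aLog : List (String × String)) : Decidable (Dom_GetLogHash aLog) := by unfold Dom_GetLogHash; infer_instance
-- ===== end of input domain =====

-- B replaces A's forward skip-flag accumulator with a right-to-left pass that builds the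
-- joined suffix back-to-front and snapshots it at each "event_id" key (alternative; same cost).

-- ===== PORT A =====
-- one loop step of A: state = (ret, skippedPre)
def pvAStep (s : String × Bool) (entry : String × String) : String × Bool :=
  let skipped := if !s.2 then (if entry.1 == "event_id" then true else s.2) else s.2
  if skipped then (s.1 ++ entry.1 ++ "|||" ++ entry.2, skipped) else (s.1, skipped)

def GetLogHash (aLog : List (String × String)) : String :=
  (aLog.foldl pvAStep ("", false)).1

-- ===== PORT B =====
-- B's reversed-iteration loop: state = (acc, res); foldr visits elements right-to-left.
def pvBStep (e : String × String) (s : String × String) : String × String :=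
  let acc := e.1 ++ "|||" ++ e.2 ++ s.1
  (acc, if e.1 == "event_id" then acc else s.2)

def GetLogHash_alt (aLog : List (String × String)) : String :=
  (aLog.foldr pvBStep ("", "")).2

-- ===== PRECONDITION & SPEC =====
def Spec_GetLogHash (aLog : List (String × String)) (out : String) : Prop := out = GetLogHash_alt aLog
instance (aLog : List (String × String)) (out : String) : Decidable (Spec_GetLogHash aLog out) := by unfold Spec_GetLogHash; infer_instance

-- ===== CLAIM =====
def Claim_equal_GetLogHash : Prop := ∀ (aLog : List (String × String)), Dom_GetLogHash aLog → Spec_GetLogHash aLog (GetLogHash aLog)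

-- ===== LEMMAS AND PROOFS =====
-- the joined rendering of a whole list (proof-only helper)
def pvJ (l : List (String × String)) : String :=
  String.join (l.map (fun x => x.1 ++ "|||" ++ x.2))

theorem pvFoldl_append_shift (l : List String) : ∀ (s : String),
    List.foldl (fun r t => r ++ t) s l = s ++ List.foldl (fun r t => r ++ t) "" l := by
  induction l with
  | nil => intro s; simp
  | cons a l ih =>
    intro s
    simp only [List.foldl_cons]
    rw [ih (s ++ a), ih ("" ++ a)]
    simp [String.append_assoc]

theorem pvJ_cons (e : String × String) (l : List (String × String)) :
    pvJ (e :: l) = e.1 ++ "|||" ++ e.2 ++ pvJ l := by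
  simp only [pvJ, List.map_cons, String.join, List.foldl_cons]
  rw [pvFoldl_append_shift]
  simp [String.append_assoc]

-- B's running accumulator is the joined rendering of the suffix it has seen
theorem pvB_fst (l : List (String × String)) :
    (l.foldr pvBStep ("", "")).1 = pvJ l := by
  induction l with
  | nil => simp [pvJ, String.join]
  | cons e rest ih =>
    simp only [List.foldr_cons, pvBStep]
    rw [ih, pvJ_cons]

-- once skippedPre is true, A appends every remaining entry
theorem pvA_foldl_true (l : List (String × String)) : ∀ (ret : String),
    (l.foldl pvAStep (ret, true)).1 = ret ++ pvJ l := by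
  induction l with
  | nil => intro ret; simp [pvJ, String.join]
  | cons e rest ih =>
    intro ret
    simp only [List.foldl_cons, pvAStep]
    simp only [Bool.not_true, Bool.false_eq_true, if_false, if_true]
    rw [ih, pvJ_cons]
    simp [String.append_assoc]

-- before the marker, A's forward fold equals B's right-to-left result
theorem pvA_eq_pvB (l : List (String × String)) : ∀ (ret : String),
    (l.foldl pvAStep (ret, false)).1 = ret ++ (l.foldr pvBStep ("", "")).2 := by
  induction l with
  | nil => intro ret; simp
  | cons e rest ih =>
    intro ret
    by_cases h : e.1 = "event_id"
    · simp only [List.foldl_cons, List.foldr_cons, pvAStep, pvBStep, h]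
      simp only [Bool.not_false, if_true, beq_self_eq_true]
      rw [pvA_foldl_true, pvB_fst]
      simp [String.append_assoc]
    · have hb : (e.1 == "event_id") = false := by simpa using h
      simp only [List.foldl_cons, List.foldr_cons, pvAStep, pvBStep, hb]
      simp only [Bool.not_false, if_true, Bool.false_eq_true, if_false]
      exact ih ret

-- ===== VERDICT =====
theorem GetLogHash_spec : Claim_equal_GetLogHash := by
  intro aLog _
  unfold Spec_GetLogHash GetLogHash GetLogHash_alt
  simpa using pvA_eq_pvB aLog ""
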